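-- pv_equiv track=rewrite | github.com/Manlove/ReportGeneration | collect_GSC_data.py | ClearCommas
-- ===== SOURCE A (Python) =====
-- def ClearCommas(line):
--     """Replaces non-separating commas in a csv file with spaces"""
--     i=0
--     quote_count = 0
--     while i < len(line):
--
--         if line[i] == '"':
--             quote_count = 0 if quote_count == 1 else 1
--
--         elif line[i] == ',' and quote_count == 1:
--             line = line[:i] + " " + line[i+1:]
--
--         i += 1
--     return line
-- ===== SOURCE B (Python) =====
-- def ClearCommas(line):
--     """Replaces non-separating commas in a csv file with spaces"""
--     out = []
--     in_quotes = False
--     for c in line: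
--         if c == '"':
--             out.append(c)
--             in_quotes = not in_quotes
--         elif c == ',' and in_quotes:
--             out.append(' ')
--         else:
--             out.append(c)
--     return ''.join(out)
-- ===== Notes on version B (the rewrite author's own statement) =====
-- stated objective: faster
-- what changed: Single pass over the characters with a boolean quote toggle, appending to an output buffer joined once, instead of rebuilding the whole string by slicing at every comma inside quotes.
import Mathlib
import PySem

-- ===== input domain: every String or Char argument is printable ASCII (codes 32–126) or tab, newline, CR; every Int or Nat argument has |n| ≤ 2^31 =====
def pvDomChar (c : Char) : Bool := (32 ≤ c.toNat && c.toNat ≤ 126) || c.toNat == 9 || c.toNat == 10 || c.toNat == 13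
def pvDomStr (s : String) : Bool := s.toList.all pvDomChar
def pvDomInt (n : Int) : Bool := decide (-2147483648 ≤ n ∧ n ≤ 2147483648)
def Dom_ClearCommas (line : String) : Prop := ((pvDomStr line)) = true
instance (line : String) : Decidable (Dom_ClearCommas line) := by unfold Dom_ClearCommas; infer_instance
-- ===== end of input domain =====

-- B replaces A's quadratic slice-and-rebuild comma replacement by a single linear pass
-- with a quote toggle and an output buffer (objective: faster, asymptotic).


-- ===== PORT A =====
-- A's while loop over index i with the mutable string `line`; line[:i] + " " + line[i+1:]
-- is ported as take i ++ [' '] ++ drop (i+1), exact for 0 ≤ i < len.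
def ClearCommasA_go (s : List Char) (i : Nat) (quote_count : Nat) : List Char :=
  if h : i < s.length then
    if (s[i]'h) = '"' then
      ClearCommasA_go s (i + 1) (if quote_count = 1 then 0 else 1)
    else if (s[i]'h) = ',' ∧ quote_count = 1 then
      ClearCommasA_go (s.take i ++ [' '] ++ s.drop (i + 1)) (i + 1) quote_count
    else
      ClearCommasA_go s (i + 1) quote_count
  else s
termination_by s.length - i
decreasing_by
  · omega
  · simp [List.length_take, List.length_drop]; omega
  · omega

def ClearCommas (line : String) : String :=
  String.ofList (ClearCommasA_go line.toList 0 0)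

-- ===== PORT B =====
-- B's for-loop: state = (out buffer, in_quotes flag), one step per character.
def ClearCommasB_step (st : List Char × Bool) (c : Char) : List Char × Bool :=
  if c = '"' then (st.1 ++ [c], !st.2)
  else if c = ',' ∧ st.2 then (st.1 ++ [' '], st.2)
  else (st.1 ++ [c], st.2)

def ClearCommas_alt (line : String) : String :=
  String.ofList (line.toList.foldl ClearCommasB_step ([], false)).1

-- ===== PRECONDITION & SPEC =====
def Spec_ClearCommas (line : String) (out : String) : Prop := out = ClearCommas_alt line
instance (line : String) (out : String) : Decidable (Spec_ClearCommas line out) := by unfold Spec_ClearCommas; infer_instance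

-- ===== CLAIM (what is proved, stated in full; the proofs are below) =====
def Claim_equal_ClearCommas : Prop := ∀ (line : String), Dom_ClearCommas line → Spec_ClearCommas line (ClearCommas line)

-- ===== LEMMAS AND PROOFS =====

-- B's fold builds its buffer on the right of whatever is already accumulated.
theorem ClearCommasB_shift (s : List Char) (out : List Char) (b : Bool) :
    (s.foldl ClearCommasB_step (out, b)).1 = out ++ (s.foldl ClearCommasB_step ([], b)).1 := by
  induction s generalizing out b with
  | nil => simp
  | cons c rest ih =>
    simp only [List.foldl_cons, ClearCommasB_step]
    split_ifs with h1 h2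
    · rw [ih, ih ([] ++ [c])]; simp
    · rw [ih, ih ([] ++ [' '])]; simp
    · rw [ih, ih ([] ++ [c])]; simp

-- Invariant: A's loop at index p.length on p ++ s, with quote_count qc, leaves p
-- untouched and processes s exactly as B's fold with flag (qc = 1).
theorem ClearCommasA_inv (s : List Char) (p : List Char) (qc : Nat) :
    ClearCommasA_go (p ++ s) p.length qc
      = p ++ (s.foldl ClearCommasB_step ([], decide (qc = 1))).1 := by
  induction s generalizing p qc with
  | nil => rw [ClearCommasA_go]; simp
  | cons c rest ih =>
    rw [ClearCommasA_go]
    have hlt : p.length < (p ++ c :: rest).length := by simp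
    have hget : (p ++ c :: rest)[p.length]'hlt = c := by
      simp
    rw [dif_pos hlt]
    simp only [hget, List.foldl_cons, ClearCommasB_step]
    by_cases h1 : c = '"'
    · rw [if_pos h1]
      have : p.length + 1 = (p ++ [c]).length := by simp
      rw [show p ++ c :: rest = (p ++ [c]) ++ rest by simp, this, ih]
      rw [ClearCommasB_shift, if_pos h1]
      by_cases h : qc = 1 <;> simp [h, ClearCommasB_shift rest [c]]
    · rw [if_neg h1]
      by_cases h2 : c = ',' ∧ qc = 1
      · rw [if_pos h2]
        have htake : (p ++ c :: rest).take p.length = p := by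
          simp
        have hdrop : (p ++ c :: rest).drop (p.length + 1) = rest := by
          rw [show p.length + 1 = (p ++ [c]).length by simp,
              show p ++ c :: rest = (p ++ [c]) ++ rest by simp, List.drop_left]
        rw [htake, hdrop]
        have : p.length + 1 = (p ++ [' ']).length := by simp
        rw [show p ++ [' '] ++ rest = (p ++ [' ']) ++ rest by simp, this, ih]
        rw [ClearCommasB_shift]
        simp [h2.1, h2.2, ClearCommasB_shift rest [' '] true]
      · rw [if_neg h2]
        have : p.length + 1 = (p ++ [c]).length := by simp
        rw [show p ++ c :: rest = (p ++ [c]) ++ rest by simp, this, ih]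
        rw [ClearCommasB_shift, if_neg h1]
        have hqc : (decide (qc = 1)) = true → ¬ c = ',' := by
          intro hb hc; exact h2 ⟨hc, by simpa using hb⟩
        by_cases hc : c = ',' ∧ (decide (qc = 1)) = true
        · exact absurd hc.1 (hqc hc.2)
        · rw [if_neg hc]; simp [ClearCommasB_shift rest [c]]

-- ===== VERDICT (by name: the statement is the Claim_ definition above) =====
theorem ClearCommas_spec : Claim_equal_ClearCommas := by
  intro line _
  unfold Spec_ClearCommas ClearCommas ClearCommas_alt
  have := congrArg String.ofList (ClearCommasA_inv line.toList [] 0)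
  simpa using this
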